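-- pv_equiv track=rewrite | github.com/Sel-Kata/GameCards | main.py | card_combinations
-- ===== SOURCE A (Python) =====
-- def card_combinations(hand):
--     all_combinations = []
--     if len(hand) >= 5:
--         combinations = []
--         for i in range(len(hand)):
--             for j in range(i + 1, len(hand)):
--                 for k in range(j + 1, len(hand)):
--                     for l in range(k + 1, len(hand)):
--                         for m in range(l + 1, len(hand)):
--                             combinations.append([hand[i], hand[j], hand[k], hand[l], hand[m]])
--         all_combinations.append(combinations)
--     else:
--         all_combinations.append([])
--
--     if len(hand) >= 4:
--         combinations = []
--         for i in range(len(hand)):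
--             for j in range(i + 1, len(hand)):
--                 for k in range(j + 1, len(hand)):
--                     for l in range(k + 1, len(hand)):
--                         combinations.append([hand[i], hand[j], hand[k], hand[l]])
--         all_combinations.append(combinations)
--     else:
--         all_combinations.append([])
--
--     if len(hand) >= 3:
--         combinations = []
--         for i in range(len(hand)):
--             for j in range(i + 1, len(hand)):
--                 for k in range(j + 1, len(hand)):
--                     combinations.append([hand[i], hand[j], hand[k]])
--         all_combinations.append(combinations)
--     else:
--         all_combinations.append([])
--
--     if len(hand) >= 2:
--         combinations = []
--         for i in range(len(hand)):
--             for j in range(i + 1, len(hand)):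
--                 combinations.append([hand[i], hand[j]])
--         all_combinations.append(combinations)
--     else:
--         all_combinations.append([])
--
--     return all_combinations
-- ===== SOURCE B (Python) =====
-- def card_combinations(hand):
--     def comb(cards, k):
--         if k == 0:
--             return [[]]
--         if len(cards) < k:
--             return []
--         first, rest = cards[0], cards[1:]
--         result = [[first] + tail for tail in comb(rest, k - 1)]
--         result += comb(rest, k)
--         return result
--     return [comb(hand, k) for k in (5, 4, 3, 2)]
-- ===== Notes on version B (the rewrite author's own statement) =====
-- stated objective: simpler
-- what changed: The four hardcoded nested-loop blocks (5,4,3,2 deep) are replaced by one recursive choose/skip combination generator applied for each k in (5,4,3,2).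
import Mathlib
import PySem

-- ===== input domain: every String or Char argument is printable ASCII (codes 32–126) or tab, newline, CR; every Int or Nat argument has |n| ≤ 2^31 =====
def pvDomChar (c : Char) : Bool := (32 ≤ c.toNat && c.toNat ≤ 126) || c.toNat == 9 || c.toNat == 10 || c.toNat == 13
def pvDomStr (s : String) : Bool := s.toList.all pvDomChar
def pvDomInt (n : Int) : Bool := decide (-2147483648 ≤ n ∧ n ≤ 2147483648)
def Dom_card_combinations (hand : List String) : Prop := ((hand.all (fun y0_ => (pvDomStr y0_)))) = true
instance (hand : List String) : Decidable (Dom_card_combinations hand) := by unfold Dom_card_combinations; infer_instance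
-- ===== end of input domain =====

-- B replaces A's four hardcoded nested-loop blocks by one recursive choose/skip
-- combination generator applied for each k in (5,4,3,2); objective: simpler.

-- ===== PORT A =====
-- literal transliteration of A's four nested-loop blocks (hand[i] via pyGetD; indices are in range)
def card_combinations (hand : List String) : List (List (List String)) :=
  let n : Int := PySem.List.len hand
  let h : Int → String := fun i => PySem.List.pyGetD hand i ""
  let b5 : List (List String) :=
    if 5 ≤ n then
      (PySem.List.pyRange 0 n 1).foldl (fun acc i =>
        (PySem.List.pyRange (i+1) n 1).foldl (fun acc j =>
          (PySem.List.pyRange (j+1) n 1).foldl (fun acc k =>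
            (PySem.List.pyRange (k+1) n 1).foldl (fun acc l =>
              (PySem.List.pyRange (l+1) n 1).foldl (fun acc m =>
                acc ++ [[h i, h j, h k, h l, h m]]) acc) acc) acc) acc) []
    else []
  let b4 : List (List String) :=
    if 4 ≤ n then
      (PySem.List.pyRange 0 n 1).foldl (fun acc i =>
        (PySem.List.pyRange (i+1) n 1).foldl (fun acc j =>
          (PySem.List.pyRange (j+1) n 1).foldl (fun acc k =>
            (PySem.List.pyRange (k+1) n 1).foldl (fun acc l =>
              acc ++ [[h i, h j, h k, h l]]) acc) acc) acc) []
    else []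
  let b3 : List (List String) :=
    if 3 ≤ n then
      (PySem.List.pyRange 0 n 1).foldl (fun acc i =>
        (PySem.List.pyRange (i+1) n 1).foldl (fun acc j =>
          (PySem.List.pyRange (j+1) n 1).foldl (fun acc k =>
            acc ++ [[h i, h j, h k]]) acc) acc) []
    else []
  let b2 : List (List String) :=
    if 2 ≤ n then
      (PySem.List.pyRange 0 n 1).foldl (fun acc i =>
        (PySem.List.pyRange (i+1) n 1).foldl (fun acc j =>
          acc ++ [[h i, h j]]) acc) []
    else []
  [b5, b4, b3, b2]

-- ===== PORT B =====
-- recursive choose/skip generator (Source B's comb helper)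
def pvComb : List String → Nat → List (List String)
  | _, 0 => [[]]
  | cards, k+1 =>
    if cards.length < k+1 then []
    else
      match cards with
      | [] => []
      | first :: rest => ((pvComb rest k).map (fun tail => first :: tail)) ++ pvComb rest (k+1)

def card_combinations_alt (hand : List String) : List (List (List String)) :=
  [5, 4, 3, 2].map (fun k => pvComb hand k)

-- ===== PRECONDITION & SPEC =====
def Spec_card_combinations (hand : List String) (out : List (List (List String))) : Prop := out = card_combinations_alt hand
instance (hand : List String) (out : List (List (List String))) : Decidable (Spec_card_combinations hand out) := by unfold Spec_card_combinations; infer_instance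

-- ===== CLAIM (what is proved, stated in full; the proofs are below) =====
def Claim_equal_card_combinations : Prop := ∀ (hand : List String), Dom_card_combinations hand → Spec_card_combinations hand (card_combinations hand)

-- ===== LEMMAS AND PROOFS =====

-- combinations without the length guard (proof helper)
def pvCombNG : List String → Nat → List (List String)
  | _, 0 => [[]]
  | [], _+1 => []
  | first :: rest, k+1 => ((pvCombNG rest k).map (fun tail => first :: tail)) ++ pvCombNG rest (k+1)

lemma pvCombNG_nil_of_lt : ∀ (cs : List String) (k : Nat), cs.length < k → pvCombNG cs k = [] := by
  intro cs
  induction cs with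
  | nil =>
    intro k h
    cases k with
    | zero => omega
    | succ k => rfl
  | cons x xs ih =>
    intro k h
    cases k with
    | zero => omega
    | succ k =>
      simp only [List.length_cons] at h
      simp [pvCombNG]
      exact ⟨ih k (by omega), ih (k+1) (by omega)⟩

lemma pvComb_eq_NG : ∀ (cs : List String) (k : Nat), pvComb cs k = pvCombNG cs k := by
  intro cs
  induction cs with
  | nil =>
    intro k; cases k with
    | zero => rfl
    | succ k => simp [pvComb, pvCombNG]
  | cons x xs ih =>
    intro k; cases k with
    | zero => rfl
    | succ k =>
      by_cases hlen : (x :: xs).length < k+1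
      · rw [pvCombNG_nil_of_lt (x::xs) (k+1) hlen]
        simp only [pvComb, if_pos hlen]
      · simp only [pvComb, if_neg hlen, pvCombNG, ih]

-- index-based combinations of indices in [a, len hand), mapped to values
def pvIdx (hand : List String) : Int → Nat → List (List String)
  | _, 0 => [[]]
  | a, k+1 =>
    (PySem.List.pyRange a (PySem.List.len hand) 1).flatMap
      (fun j => (pvIdx hand (j+1) k).map (fun t => PySem.List.pyGetD hand j "" :: t))

lemma pvIdx_split (hand : List String) (a : Int) (k : Nat)
    (h : a < PySem.List.len hand) :
    pvIdx hand a (k+1) =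
      (pvIdx hand (a+1) k).map (fun t => PySem.List.pyGetD hand a "" :: t)
        ++ pvIdx hand (a+1) (k+1) := by
  simp only [pvIdx]
  rw [PySem.List.pyRange_one_cons h, List.flatMap_cons]

lemma pvIdx_eq_NG (hand : List String) :
    ∀ (k : Nat) (a : Int), 0 ≤ a →
      pvIdx hand a k = pvCombNG (hand.drop a.toNat) k := by
  intro k
  induction k with
  | zero => intro a ha; simp [pvIdx, pvCombNG]
  | succ k ihk =>
    have inner : ∀ (d : Nat) (a : Int), 0 ≤ a → hand.length - a.toNat = d →
        pvIdx hand a (k+1) = pvCombNG (hand.drop a.toNat) (k+1) := by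
      intro d
      induction d with
      | zero =>
        intro a ha hd
        have hn : (PySem.List.len hand) ≤ a := by
          have := Int.toNat_of_nonneg ha
          simp only [PySem.List.len_eq]
          omega
        have hdrop : hand.drop a.toNat = [] := List.drop_eq_nil_of_le (by omega)
        simp only [pvIdx]
        rw [PySem.List.pyRange_one_eq_nil hn, List.flatMap_nil, hdrop]
        rfl
      | succ d ihd =>
        intro a ha hd
        have hta := Int.toNat_of_nonneg ha
        have hlt : a.toNat < hand.length := by omega
        have haInt : a < PySem.List.len hand := by
          simp only [PySem.List.len_eq]; omega
        rw [pvIdx_split hand a k haInt]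
        rw [List.drop_eq_getElem_cons hlt]
        simp only [pvCombNG]
        have ht1 : (a+1).toNat = a.toNat + 1 := by omega
        congr 1
        · rw [ihk (a+1) (by omega), ht1,
            PySem.List.pyGetD_eq_getElem hand "" ha haInt]
        · rw [ihd (a+1) (by omega) (by omega), ht1]
    exact fun a ha => inner (hand.length - a.toNat) a ha rfl

lemma pvIdx_eq_comb (hand : List String) (k : Nat) :
    pvIdx hand 0 k = pvComb hand k := by
  rw [pvIdx_eq_NG hand k 0 le_rfl, pvComb_eq_NG]
  simp

-- ===== VERDICT (by name: the statement is the Claim_ definition above) =====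
theorem card_combinations_spec : Claim_equal_card_combinations := by
  intro hand _
  show card_combinations hand = card_combinations_alt hand
  have hcomb_nil : ∀ k : Nat, hand.length < k → pvComb hand k = [] := by
    intro k hlen
    rw [pvComb_eq_NG]; exact pvCombNG_nil_of_lt hand k hlen
  have hblock : ∀ k : Nat, ¬ ((k:Int) ≤ PySem.List.len hand) → pvComb hand k = [] := by
    intro k hk
    refine hcomb_nil k ?_
    simp only [PySem.List.len_eq] at hk
    omega
  simp only [card_combinations, card_combinations_alt, List.map]
  congr 1
  · by_cases h : (5:Int) ≤ PySem.List.len hand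
    · rw [if_pos h, ← pvIdx_eq_comb]
      simp [pvIdx, List.map_map, Function.comp_def, List.flatMap_def]
    · rw [if_neg h, hblock 5 h]
  congr 1
  · by_cases h : (4:Int) ≤ PySem.List.len hand
    · rw [if_pos h, ← pvIdx_eq_comb]
      simp [pvIdx, List.map_map, Function.comp_def, List.flatMap_def]
    · rw [if_neg h, hblock 4 h]
  congr 1
  · by_cases h : (3:Int) ≤ PySem.List.len hand
    · rw [if_pos h, ← pvIdx_eq_comb]
      simp [pvIdx, List.map_map, Function.comp_def, List.flatMap_def]
    · rw [if_neg h, hblock 3 h]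
  congr 1
  by_cases h : (2:Int) ≤ PySem.List.len hand
  · rw [if_pos h, ← pvIdx_eq_comb]
    simp [pvIdx, List.map_map, Function.comp_def, List.flatMap_def]
  · rw [if_neg h, hblock 2 h]
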